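-- pv_equiv track=rewrite | github.com/Ramesh7128/booktickets | check.py | check_for_n_continous_tickets
-- ===== SOURCE A (Python) =====
-- def check_for_n_continous_tickets(tickets_list, no_of_tickets=2):
-- 	tickets_list = [int(x) for x in tickets_list]
-- 	tickets_list.sort()
-- 	continous_grouping_list = []
-- 	grouping_index_list = []
-- 	temp_list = []
-- 	for number in tickets_list:
-- 		if temp_list:
-- 			if number == temp_list[-1]+1:
-- 				temp_list.append(number)
-- 			else:
-- 				continous_grouping_list.append(temp_list)
-- 				grouping_index_list.append(len(temp_list))
-- 				temp_list = []
-- 				temp_list.append(number)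
-- 		else:
-- 			temp_list.append(number)
--
--
-- 	continous_grouping_list.append(temp_list)
-- 	grouping_index_list.append(len(temp_list))
--
-- 	for i in range(len(grouping_index_list)):
-- 		if no_of_tickets <= grouping_index_list[i]:
-- 			return continous_grouping_list[i]
-- ===== SOURCE B (Python) =====
-- def check_for_n_continous_tickets(tickets_list, no_of_tickets=2):
--     ints = sorted(int(x) for x in tickets_list)
--     n = len(ints)
--     if n == 0:
--         return [] if no_of_tickets <= 0 else None
--     # cut positions: 0, n, and every index where the value does not continue the
--     # previous one (value-minus-index key changes); consecutive cut pairs delimit runs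
--     cuts = [i for i in range(n + 1)
--             if i == 0 or i == n or ints[i] - i != ints[i - 1] - (i - 1)]
--     for a, b in zip(cuts, cuts[1:]):
--         if b - a >= no_of_tickets:
--             return ints[a:b]
--     return None
-- ===== Notes on version B (the rewrite author's own statement) =====
-- stated objective: alternative
-- what changed: A grows runs statefully (temp list compared to its last element) into two parallel lists of runs and lengths and then scans them by index; B computes, from the sorted copy, the list of cut positions where the value-minus-index key changes, and returns the slice between the first pair of consecutive cuts that is wide enough.
import Mathlib
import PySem

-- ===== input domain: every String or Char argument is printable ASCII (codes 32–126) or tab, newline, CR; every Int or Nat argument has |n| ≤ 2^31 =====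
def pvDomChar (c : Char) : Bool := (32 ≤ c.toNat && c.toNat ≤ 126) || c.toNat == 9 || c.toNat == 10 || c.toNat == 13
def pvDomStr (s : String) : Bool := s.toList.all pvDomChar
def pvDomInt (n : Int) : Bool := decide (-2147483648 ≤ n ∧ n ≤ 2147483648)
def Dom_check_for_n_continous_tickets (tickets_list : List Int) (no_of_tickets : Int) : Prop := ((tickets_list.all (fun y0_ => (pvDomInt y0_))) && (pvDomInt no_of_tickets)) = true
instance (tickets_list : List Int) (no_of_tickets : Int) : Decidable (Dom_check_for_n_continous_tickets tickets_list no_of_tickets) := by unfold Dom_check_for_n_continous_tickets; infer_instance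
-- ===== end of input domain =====

-- B replaces A's stateful run-growing (a temp list compared with its own last element, accumulated
-- into two parallel lists that a second indexed loop scans) by cut-position arithmetic on the sorted
-- copy: the boundary indices where the value-minus-index key changes delimit the runs, and the first
-- wide-enough pair of consecutive cuts is returned as a slice. Neither version mutates its argument.

-- ===== PORT A =====
-- one step of A's grouping loop; state = (continous_grouping_list, grouping_index_list, temp_list)
def pvStepA (acc : List (List Int) × List Int × List Int) (number : Int) :
    List (List Int) × List Int × List Int :=
  match acc with
  | (gs, idxs, temp) =>
    if temp ≠ [] then
      if number = temp.getLast! + 1 then (gs, idxs, temp ++ [number])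
      else (gs ++ [temp], idxs ++ [(temp.length : Int)], [number])
    else (gs, idxs, temp ++ [number])

-- A's final 'for i in range(len(grouping_index_list))' loop; the two parallel lists
-- (equal length by construction) are iterated in lockstep via their zip.
def pvSearchA (n : Int) : List (List Int × Int) → Option (List Int)
  | [] => none
  | (g, l) :: rest => if n ≤ l then some g else pvSearchA n rest

def check_for_n_continous_tickets (tickets_list : List Int) (no_of_tickets : Int) : Option (List Int) :=
  let ts := PySem.List.sorted (tickets_list.map (fun x => x)) (fun x => x) false  -- int(x) on an int is the identity
  let st := ts.foldl pvStepA ([], [], [])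
  let groups := st.1 ++ [st.2.2]
  let idxs := st.2.1 ++ [(st.2.2.length : Int)]
  pvSearchA no_of_tickets (groups.zip idxs)

-- ===== PORT B =====
-- B's 'for a, b in zip(cuts, cuts[1:])' loop with early return
def pvSearchB (ints : List Int) (n : Int) : List (Int × Int) → Option (List Int)
  | [] => none
  | (a, b) :: rest =>
      if n ≤ b - a then some (PySem.List.slice ints (some a) (some b)) else pvSearchB ints n rest

def check_for_n_continous_tickets_alt (tickets_list : List Int) (no_of_tickets : Int) : Option (List Int) :=
  let ints := PySem.List.sorted (tickets_list.map (fun x => x)) (fun x => x) false  -- int(x) on an int is the identity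
  let n := ints.length
  if n = 0 then (if no_of_tickets ≤ 0 then some [] else none)
  else
    let cuts := (PySem.List.pyRange 0 ((n : Int) + 1) 1).filter
      (fun i => i == 0 || i == (n : Int) ||
        PySem.List.pyGetD ints i 0 - i != PySem.List.pyGetD ints (i - 1) 0 - (i - 1))
    pvSearchB ints no_of_tickets (cuts.zip cuts.tail)

-- ===== PRECONDITION & SPEC =====
def Spec_check_for_n_continous_tickets (tickets_list : List Int) (no_of_tickets : Int) (out : Option (List Int)) : Prop := out = check_for_n_continous_tickets_alt tickets_list no_of_tickets
instance (tickets_list : List Int) (no_of_tickets : Int) (out : Option (List Int)) : Decidable (Spec_check_for_n_continous_tickets tickets_list no_of_tickets out) := by unfold Spec_check_for_n_continous_tickets; infer_instance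

-- ===== CLAIM (what is proved, stated in full; the proofs are below) =====
def Claim_equal_check_for_n_continous_tickets : Prop := ∀ (tickets_list : List Int) (no_of_tickets : Int), Dom_check_for_n_continous_tickets tickets_list no_of_tickets → Spec_check_for_n_continous_tickets tickets_list no_of_tickets (check_for_n_continous_tickets tickets_list no_of_tickets)

-- ===== LEMMAS AND PROOFS =====

-- proof-only: the list of maximal-by-construction runs both programs walk through

-- length of the consecutive continuation of `prev` at the front of the list
def pvContLen (prev : Int) : List Int → Nat
  | [] => 0
  | x :: t => if x = prev + 1 then pvContLen x t + 1 else 0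

def pvRuns : List Int → List (List Int)
  | [] => []
  | x :: xs => (x :: xs.take (pvContLen x xs)) :: pvRuns (xs.drop (pvContLen x xs))
termination_by s => s.length
decreasing_by simp

-- A's runs, as accumulated by its loop (state-passing form)
def pvCollect : List Int → List Int → List (List Int)
  | run, [] => [run]
  | run, x :: rest =>
      if x = run.getLast! + 1 then pvCollect (run ++ [x]) rest
      else run :: pvCollect [x] rest

-- B's cut predicate and cut list, on the Nat side
def pvCutP (s : List Int) (i : Nat) : Bool :=
  i == 0 || i == s.length || s.getD i 0 != s.getD (i - 1) 0 + 1

def pvCuts (s : List Int) : List Nat := (List.range (s.length + 1)).filter (pvCutP s)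

-- B's search loop over Nat cut pairs
def pvSearchBN (s : List Int) (nt : Int) : List (Nat × Nat) → Option (List Int)
  | [] => none
  | (a, b) :: rest =>
      if nt ≤ (b : Int) - (a : Int) then some ((s.drop a).take (b - a)) else pvSearchBN s nt rest

lemma pvCollect_ne_nil (rest run : List Int) : pvCollect run rest ≠ [] := by
  induction rest generalizing run with
  | nil => simp [pvCollect]
  | cons x rest ih =>
      simp only [pvCollect]
      split
      · exact ih _
      · simp

lemma getLast!_cons_of_ne_nil {α : Type} [Inhabited α] (a : α) (l : List α) (h : l ≠ []) :
    (a :: l).getLast! = l.getLast! := by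
  cases l with
  | nil => exact absurd rfl h
  | cons b t => simp [List.getLast!]

lemma dropLast_append_getLast! {α : Type} [Inhabited α] (l : List α) (h : l ≠ []) :
    l.dropLast ++ [l.getLast!] = l := by
  induction l with
  | nil => exact absurd rfl h
  | cons a t ih =>
      cases t with
      | nil => simp [List.getLast!]
      | cons b u =>
          rw [List.dropLast_cons_of_ne_nil (by simp), getLast!_cons_of_ne_nil a _ (by simp)]
          simpa using ih (by simp)

lemma getLast!_append_singleton {α : Type} [Inhabited α] (l : List α) (x : α) :
    (l ++ [x]).getLast! = x := by
  induction l with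
  | nil => simp [List.getLast!]
  | cons a t ih => rw [List.cons_append, getLast!_cons_of_ne_nil a _ (by simp), ih]

lemma foldA_eq (rest : List Int) : ∀ (gs : List (List Int)) (temp : List Int), temp ≠ [] →
    rest.foldl pvStepA (gs, gs.map (fun g => ((g.length : Int))), temp)
      = (gs ++ (pvCollect temp rest).dropLast,
         (gs ++ (pvCollect temp rest).dropLast).map (fun g => ((g.length : Int))),
         (pvCollect temp rest).getLast!) := by
  induction rest with
  | nil =>
      intro gs temp h
      simp [pvCollect, List.getLast!]
  | cons x rest ih =>
      intro gs temp h
      simp only [List.foldl_cons, pvStepA, if_pos h]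
      by_cases hx : x = temp.getLast! + 1
      · rw [if_pos hx, ih gs (temp ++ [x]) (by simp)]
        simp only [pvCollect, if_pos hx]
      · rw [if_neg hx]
        have hm : gs.map (fun g => ((g.length : Int))) ++ [((temp.length : Int))]
            = (gs ++ [temp]).map (fun g => ((g.length : Int))) := by simp
        rw [hm, ih (gs ++ [temp]) [x] (by simp)]
        have hC := pvCollect_ne_nil rest [x]
        simp only [pvCollect, if_neg hx, List.dropLast_cons_of_ne_nil hC,
          getLast!_cons_of_ne_nil temp _ hC, List.append_assoc, List.cons_append,
          List.nil_append]

lemma zip_self_map {α β : Type} (f : α → β) (l : List α) :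
    l.zip (l.map f) = l.map (fun a => (a, f a)) := by
  induction l with
  | nil => rfl
  | cons a l ih => simp [ih]

-- A's accumulated runs are exactly the maximal runs pvRuns lists
lemma pvCollect_eq_runs (rest : List Int) : ∀ (r : List Int), r ≠ [] →
    pvCollect r rest
      = (r ++ rest.take (pvContLen r.getLast! rest)) :: pvRuns (rest.drop (pvContLen r.getLast! rest)) := by
  induction rest with
  | nil => intro r h; simp [pvCollect, pvContLen, pvRuns]
  | cons x t ih =>
      intro r h
      simp only [pvCollect, pvContLen]
      by_cases hx : x = r.getLast! + 1
      · rw [if_pos hx, if_pos hx, ih (r ++ [x]) (by simp), getLast!_append_singleton]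
        simp [List.take_succ_cons, List.drop_succ_cons]
      · rw [if_neg hx, if_neg hx, ih [x] (by simp)]
        have hg : ([x] : List Int).getLast! = x := by simp [List.getLast!]
        rw [hg]
        simp only [List.take_zero, List.drop_zero, List.append_nil]
        rw [pvRuns]
        simp

-- A reduced to search over pvRuns
lemma A_eq_runs (tickets_list : List Int) (no_of_tickets : Int) :
    check_for_n_continous_tickets tickets_list no_of_tickets
      = match PySem.List.sorted (tickets_list.map (fun x => x)) (fun x => x) false with
        | [] => if no_of_tickets ≤ 0 then some [] else none
        | t :: rest => pvSearchA no_of_tickets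
            ((pvRuns (t :: rest)).map (fun g => (g, (g.length : Int)))) := by
  unfold check_for_n_continous_tickets
  cases h : PySem.List.sorted (tickets_list.map (fun x => x)) (fun x => x) false with
  | nil => simp only [List.foldl_nil]; simp [pvSearchA]
  | cons t rest =>
      simp only [List.foldl_cons]
      have h1 : pvStepA ([], [], []) t = ([], [], [t]) := by simp [pvStepA]
      rw [h1]
      have h2 := foldA_eq rest [] [t] (by simp)
      simp only [List.map_nil, List.nil_append] at h2
      rw [h2]
      have hC := pvCollect_ne_nil rest [t]
      have hdl := dropLast_append_getLast! (pvCollect [t] rest) hC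
      have hmap : (pvCollect [t] rest).dropLast.map (fun g => ((g.length : Int)))
            ++ [(((pvCollect [t] rest).getLast!.length : Int))]
          = (pvCollect [t] rest).map (fun g => ((g.length : Int))) := by
        conv_rhs => rw [← hdl]
        simp
      simp only [hdl, hmap, zip_self_map]
      rw [pvCollect_eq_runs rest [t] (by simp)]
      have hg : ([t] : List Int).getLast! = t := by simp [List.getLast!]
      rw [hg, pvRuns]
      simp

lemma pvContLen_le (prev : Int) (xs : List Int) : pvContLen prev xs ≤ xs.length := by
  induction xs generalizing prev with
  | nil => simp [pvContLen]
  | cons x t ih =>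
      simp only [pvContLen]
      split
      · simpa using ih x
      · simp

lemma getD_drop (l : List Int) (m j : Nat) (d : Int) : (l.drop m).getD j d = l.getD (m + j) d := by
  simp [List.getD_eq_getElem?_getD, List.getElem?_drop]

-- inside the first run every element continues the previous one …
lemma run_inside (x : Int) (xs : List Int) :
    ∀ i < pvContLen x xs, xs.getD i 0 = (x :: xs).getD i 0 + 1 := by
  induction xs generalizing x with
  | nil => intro i hi; simp [pvContLen] at hi
  | cons y t ih =>
      intro i hi
      simp only [pvContLen] at hi
      by_cases hy : y = x + 1
      · rw [if_pos hy] at hi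
        cases i with
        | zero => simpa using hy
        | succ j =>
            have := ih y j (by omega)
            simpa [List.getD_cons_succ] using this
      · rw [if_neg hy] at hi; omega

-- … and the run is maximal
lemma run_maximal (x : Int) (xs : List Int) (h : pvContLen x xs < xs.length) :
    xs.getD (pvContLen x xs) 0 ≠ (x :: xs).getD (pvContLen x xs) 0 + 1 := by
  induction xs generalizing x with
  | nil => simp at h
  | cons y t ih =>
      simp only [pvContLen] at h ⊢
      by_cases hy : y = x + 1
      · rw [if_pos hy] at h ⊢
        have := ih y (by simpa using h)
        simpa [List.getD_cons_succ] using this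
      · rw [if_neg hy] at h ⊢
        simpa using hy

lemma pvCuts_head (t : List Int) :
    pvCuts t = 0 :: ((List.range t.length).map Nat.succ).filter (pvCutP t) := by
  rw [pvCuts, List.range_succ_eq_map, List.filter_cons]
  simp [pvCutP]

-- cut-list decomposition at the first run boundary
lemma pvCuts_cons (x : Int) (xs : List Int) :
    pvCuts (x :: xs)
      = 0 :: (pvCuts (xs.drop (pvContLen x xs))).map ((pvContLen x xs + 1) + ·) := by
  have hc := pvContLen_le x xs
  set c := pvContLen x xs with hcdef
  have hlen : (x :: xs).length + 1 = (c + 1) + ((xs.drop c).length + 1) := by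
    simp [List.length_drop]; omega
  rw [pvCuts, pvCuts, hlen, List.range_add, List.filter_append]
  have h1 : (List.range (c + 1)).filter (pvCutP (x :: xs)) = [0] := by
    rw [List.range_succ_eq_map, List.filter_cons]
    have h0 : pvCutP (x :: xs) 0 = true := by simp [pvCutP]
    rw [if_pos h0, List.filter_map]
    have h2 : (List.range c).filter ((pvCutP (x :: xs)) ∘ Nat.succ) = [] := by
      apply List.filter_eq_nil_iff.mpr
      intro j hj
      simp only [List.mem_range] at hj
      have hrun := run_inside x xs j (by omega)
      simp only [Function.comp, pvCutP, Nat.succ_eq_add_one, Nat.add_sub_cancel,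
        List.getD_cons_succ, List.length_cons, Bool.or_eq_true, beq_iff_eq, bne_iff_ne, ne_eq]
      omega
    rw [h2]
    simp
  have h3 : ∀ j ∈ List.range ((xs.drop c).length + 1),
      pvCutP (x :: xs) ((c + 1) + j) = pvCutP (xs.drop c) j := by
    intro j hj
    simp only [List.mem_range, List.length_drop] at hj
    cases j with
    | zero =>
        have hR : pvCutP (xs.drop c) 0 = true := by simp [pvCutP]
        rw [hR]
        by_cases hcx : c = xs.length
        · simp [pvCutP, hcx]
        · have hmax := run_maximal x xs (by omega)
          rw [← hcdef] at hmax
          simp only [pvCutP, Nat.add_zero, Nat.add_sub_cancel, List.getD_cons_succ,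
            List.length_cons, Bool.or_eq_true, beq_iff_eq, bne_iff_ne, ne_eq]
          omega
    | succ i =>
        have e1 : (x :: xs).getD ((c + 1) + (i + 1)) 0 = (xs.drop c).getD (i + 1) 0 := by
          rw [getD_drop]
          have hn : (c + 1) + (i + 1) = (c + (i + 1)) + 1 := by omega
          rw [hn, List.getD_cons_succ]
        have e2 : (x :: xs).getD ((c + 1) + (i + 1) - 1) 0 = (xs.drop c).getD i 0 := by
          rw [getD_drop]
          have hn : (c + 1) + (i + 1) - 1 = (c + i) + 1 := by omega
          rw [hn, List.getD_cons_succ]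
        rw [Bool.eq_iff_iff]
        simp only [pvCutP, Bool.or_eq_true, beq_iff_eq, bne_iff_ne, ne_eq, List.length_cons,
          List.length_drop, Nat.add_sub_cancel, e1, e2]
        omega
  rw [h1, List.filter_map,
    List.filter_congr (fun j hj => by simpa [Function.comp] using h3 j hj)]
  simp

lemma searchBN_shift (s : List Int) (nt : Int) (k : Nat) (pairs : List (Nat × Nat)) :
    pvSearchBN s nt (pairs.map (Prod.map (k + ·) (k + ·))) = pvSearchBN (s.drop k) nt pairs := by
  induction pairs with
  | nil => rfl
  | cons p rest ih =>
      obtain ⟨a, b⟩ := p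
      simp only [List.map_cons, Prod.map, pvSearchBN]
      have h1 : ((k + b : Nat) : Int) - ((k + a : Nat) : Int) = (b : Int) - (a : Int) := by
        push_cast; ring
      rw [h1, Nat.add_sub_add_left, ← List.drop_drop, ih]

-- B's cut-pair search equals A's run search
lemma searchBN_eq_runs (nt : Int) :
    ∀ (m : Nat) (s : List Int), s.length ≤ m →
      pvSearchBN s nt ((pvCuts s).zip (pvCuts s).tail)
        = pvSearchA nt ((pvRuns s).map (fun g => (g, (g.length : Int)))) := by
  intro m
  induction m with
  | zero =>
      intro s hs
      cases s with
      | nil => rw [show pvRuns ([] : List Int) = [] from by rw [pvRuns]]; rfl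
      | cons x xs => simp at hs
  | succ m ih =>
      intro s hs
      cases s with
      | nil => rw [show pvRuns ([] : List Int) = [] from by rw [pvRuns]]; rfl
      | cons x xs =>
          have hc := pvContLen_le x xs
          rw [pvCuts_cons, pvCuts_head (xs.drop (pvContLen x xs))]
          set c := pvContLen x xs with hcdef
          set R := ((List.range (xs.drop c).length).map Nat.succ).filter (pvCutP (xs.drop c))
            with hRdef
          simp only [List.map_cons, Nat.add_zero, List.tail_cons, List.zip_cons_cons]
          have hz : (((c + 1) :: R.map ((c + 1) + ·)).zip (R.map ((c + 1) + ·)))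
              = ((0 :: R).zip R).map (Prod.map ((c + 1) + ·) ((c + 1) + ·)) := by
            rw [show ((c + 1) :: R.map ((c + 1) + ·)) = (0 :: R).map ((c + 1) + ·) from by simp,
              List.zip_map]
          rw [hz]
          simp only [pvSearchBN]
          rw [pvRuns, ← hcdef]
          simp only [List.map_cons, pvSearchA]
          have hlen1 : (x :: xs.take c).length = c + 1 := by
            simp [List.length_take]; omega
          have hcond : (((c + 1 : Nat)) : Int) - ((0 : Nat) : Int)
              = (((x :: xs.take c).length : Nat) : Int) := by
            rw [hlen1]; push_cast; ring
          rw [hcond]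
          by_cases hnt : nt ≤ (((x :: xs.take c).length : Nat) : Int)
          · rw [if_pos hnt, if_pos hnt]
            simp [List.take_succ_cons]
          · rw [if_neg hnt, if_neg hnt]
            rw [searchBN_shift]
            have hdrop : (x :: xs).drop (c + 1) = xs.drop c := by simp
            rw [hdrop, show (0 :: R) = pvCuts (xs.drop c) from (pvCuts_head (xs.drop c)).symm,
              show R = (pvCuts (xs.drop c)).tail from by
                rw [pvCuts_head (xs.drop c), List.tail_cons]]
            exact ih (xs.drop c)
              (by simp only [List.length_cons] at hs; simp [List.length_drop]; omega)

lemma searchB_cast (s : List Int) (nt : Int) (pairs : List (Nat × Nat)) :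
    pvSearchB s nt (pairs.map (Prod.map (fun a : Nat => (a : Int)) (fun a : Nat => (a : Int))))
      = pvSearchBN s nt pairs := by
  induction pairs with
  | nil => rfl
  | cons p rest ih =>
      obtain ⟨a, b⟩ := p
      simp only [List.map_cons, Prod.map, pvSearchB, pvSearchBN]
      rw [PySem.List.slice_natCast, ih]

-- B reduced to the Nat-side cut search
lemma B_eq_cuts (tickets_list : List Int) (no_of_tickets : Int) :
    check_for_n_continous_tickets_alt tickets_list no_of_tickets
      = match PySem.List.sorted (tickets_list.map (fun x => x)) (fun x => x) false with
        | [] => if no_of_tickets ≤ 0 then some [] else none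
        | t :: rest => pvSearchBN (t :: rest) no_of_tickets
            ((pvCuts (t :: rest)).zip (pvCuts (t :: rest)).tail) := by
  unfold check_for_n_continous_tickets_alt
  cases h : PySem.List.sorted (tickets_list.map (fun x => x)) (fun x => x) false with
  | nil => simp
  | cons t rest =>
      simp only [List.length_cons]
      rw [if_neg (by omega)]
      have hcast : (((t :: rest).length : Int) + 1) = (((t :: rest).length + 1 : Nat) : Int) := by
        push_cast; ring
      simp only [List.length_cons] at hcast
      rw [hcast, PySem.List.pyRange_zero_natCast, List.filter_map]
      have hcg : ∀ k ∈ List.range (rest.length + 1 + 1),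
          ((fun i : Int => (i == 0 || i == ((rest.length + 1 : Nat) : Int) ||
            PySem.List.pyGetD (t :: rest) i 0 - i
              != PySem.List.pyGetD (t :: rest) (i - 1) 0 - (i - 1)))
            ∘ (fun k : Nat => (k : Int))) k
          = pvCutP (t :: rest) k := by
        intro k hk
        simp only [List.mem_range] at hk
        cases k with
        | zero => simp [pvCutP]
        | succ j =>
            rw [Bool.eq_iff_iff]
            have e0 : ((j + 1 : Nat) : Int) - 1 = ((j : Nat) : Int) := by push_cast; ring
            simp only [Function.comp, e0, PySem.List.pyGetD_natCast, pvCutP, Nat.add_sub_cancel,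
              List.length_cons, Bool.or_eq_true, beq_iff_eq, bne_iff_ne, ne_eq]
            omega
      rw [List.filter_congr hcg]
      have hfold : (List.range (rest.length + 1 + 1)).filter (pvCutP (t :: rest))
          = pvCuts (t :: rest) := by simp [pvCuts]
      rw [hfold]
      rw [show ((pvCuts (t :: rest)).map (fun k : Nat => (k : Int))).tail
            = (pvCuts (t :: rest)).tail.map (fun k : Nat => (k : Int)) from (List.map_tail ..).symm,
        List.zip_map]
      exact searchB_cast (t :: rest) no_of_tickets _

-- ===== VERDICT (by name: the statement is the Claim_ definition above) =====
theorem check_for_n_continous_tickets_spec : Claim_equal_check_for_n_continous_tickets := by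
  intro tickets_list no_of_tickets _
  unfold Spec_check_for_n_continous_tickets
  rw [A_eq_runs, B_eq_cuts]
  cases h : PySem.List.sorted (tickets_list.map (fun x => x)) (fun x => x) false with
  | nil => rfl
  | cons t rest =>
      simp only
      exact (searchBN_eq_runs no_of_tickets (t :: rest).length (t :: rest) le_rfl).symm
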